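-- pv_equiv track=rewrite | github.com/akshayrao96/t4-cicd | src/util/common_utils.py | get_cnt_map
-- ===== SOURCE A (Python) =====
-- import collections
--
-- def get_cnt_map(adjacency_list:dict) -> dict:
--     """ Construct the dependency count map
--
--     Args:
--         adjacency_list (dict): graph representation of given nodes
--
--     Returns:
--         dict: the dependency count map
--     """
--     node2depend_cnt = collections.defaultdict(int)
--
--     # fill the depend_cnt based on adjacency list graph
--     # recall for each key value pairs in adjacency list
--     # the key is required by the value, key need to finish first
--     for node, required_by in adjacency_list.items():
--         if node not in node2depend_cnt:
--             node2depend_cnt[node] = 0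
--         # Then for each value in required_by, we add the depend_cnt by 1
--         for req in required_by:
--             node2depend_cnt[req] += 1
--     return node2depend_cnt
-- ===== SOURCE B (Python) =====
-- import collections
--
-- def get_cnt_map(adjacency_list: dict) -> dict:
--     """Two staged passes, no counting dict: (1) collect every mentioned node in
--     first-appearance order; (2) for each node, count its occurrences by scanning
--     all dependency lists."""
--     order = []
--     seen = set()
--     for node, required_by in adjacency_list.items():
--         for x in (node, *required_by):
--             if x not in seen:
--                 seen.add(x)
--                 order.append(x)
--     result = collections.defaultdict(int)
--     for k in order:
--         result[k] = sum(reqs.count(k) for reqs in adjacency_list.values())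
--     return result
-- ===== Notes on version B (the rewrite author's own statement) =====
-- stated objective: alternative
-- what changed: A makes one interleaved pass mutating a counting defaultdict per referenced item; B keeps no counter at all: it first collects every mentioned node in first-appearance order with a seen-set, then computes each node's in-degree independently by re-scanning all dependency lists with list.count, trading the hash-counter single pass for a per-node nested scan.
import Mathlib
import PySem

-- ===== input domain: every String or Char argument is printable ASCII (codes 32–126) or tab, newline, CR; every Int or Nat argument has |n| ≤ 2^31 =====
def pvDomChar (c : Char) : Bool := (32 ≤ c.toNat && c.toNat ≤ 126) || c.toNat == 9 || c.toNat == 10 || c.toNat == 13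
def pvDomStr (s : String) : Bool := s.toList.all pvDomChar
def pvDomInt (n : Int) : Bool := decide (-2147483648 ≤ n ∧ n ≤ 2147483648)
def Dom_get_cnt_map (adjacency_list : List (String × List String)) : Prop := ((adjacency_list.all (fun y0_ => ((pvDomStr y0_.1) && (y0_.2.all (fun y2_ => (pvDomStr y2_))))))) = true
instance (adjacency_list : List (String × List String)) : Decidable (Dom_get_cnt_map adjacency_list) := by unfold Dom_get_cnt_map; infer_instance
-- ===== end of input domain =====

-- B replaces A's single pass with a mutating counter dict by two staged passes with no
-- counter: a seen-set pass fixing the node order, then a per-node counting scan; objective: alternative.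

-- ===== PORT A =====
-- A: one loop over the items; force the key to 0 if absent, then increment every referenced node.
def get_cnt_map (adjacency_list : List (String × List String)) : List (String × Int) :=
  (adjacency_list.foldl
    (fun d p =>
      let d1 := if d.contains p.1 then d else d.insert p.1 0
      p.2.foldl (fun d req => d.insert req (d.getD req 0 + 1)) d1)
    (PySem.Dict.empty : PySem.Dict String Int)).items

-- ===== PORT B =====
-- B: seen-set pass collecting `order`, then for each node a counting scan over all value lists.
def get_cnt_map_alt (adjacency_list : List (String × List String)) : List (String × Int) :=
  let st := adjacency_list.foldl
    (fun (st : List String × PySem.Set String) p =>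
      (p.1 :: p.2).foldl
        (fun st x =>
          if PySem.Set.contains st.2 x then st else (st.1 ++ [x], PySem.Set.add st.2 x))
        st)
    ([], (PySem.Set.empty : PySem.Set String))
  (st.1.foldl
    (fun (d : PySem.Dict String Int) k =>
      d.insert k (adjacency_list.foldl (fun s p => s + (p.2.count k : Int)) 0))
    (PySem.Dict.empty : PySem.Dict String Int)).items

-- ===== PRECONDITION & SPEC =====
def Spec_get_cnt_map (adjacency_list : List (String × List String)) (out : List (String × Int)) : Prop := out = get_cnt_map_alt adjacency_list
instance (adjacency_list : List (String × List String)) (out : List (String × Int)) : Decidable (Spec_get_cnt_map adjacency_list out) := by unfold Spec_get_cnt_map; infer_instance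

-- ===== CLAIM (what is proved, stated in full; the proofs are below) =====
def Claim_equal_get_cnt_map : Prop := ∀ (adjacency_list : List (String × List String)), Dom_get_cnt_map adjacency_list → Spec_get_cnt_map adjacency_list (get_cnt_map adjacency_list)

-- ===== LEMMAS AND PROOFS =====

-- A side: keys of A's running dict = set-update of everything mentioned so far
theorem pv_keys_loop (l : List (String × List String)) (d : PySem.Dict String Int) :
    (l.foldl
      (fun d p =>
        let d1 := if d.contains p.1 then d else d.insert p.1 0
        p.2.foldl (fun d req => d.insert req (d.getD req 0 + 1)) d1)
      d).keys = PySem.Set.update d.keys (l.flatMap (fun p => p.1 :: p.2)) := by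
  induction l generalizing d with
  | nil => simp [PySem.Set.update]
  | cons p l ih =>
    simp only [List.foldl_cons, List.flatMap_cons]
    rw [ih, PySem.Set.update_append, PySem.Set.update_cons]
    congr 1
    rw [PySem.Dict.keys_foldl_insert]
    congr 1
    by_cases h : d.contains p.1 = true
    · simp only [h, if_true]
      rw [PySem.Set.add_of_mem ((PySem.Dict.contains_iff_mem_keys d p.1).mp h)]
    · rw [if_neg h, PySem.Dict.keys_insert_of_not_contains d 0 (by simpa using h),
        PySem.Set.add_of_not_mem]
      intro hm
      exact h ((PySem.Dict.contains_iff_mem_keys d p.1).mpr hm)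

-- A side: value of A's running dict at any node = previous value + references seen so far
theorem pv_getD_loop (l : List (String × List String)) (d : PySem.Dict String Int) (v : String) :
    (l.foldl
      (fun d p =>
        let d1 := if d.contains p.1 then d else d.insert p.1 0
        p.2.foldl (fun d req => d.insert req (d.getD req 0 + 1)) d1)
      d).getD v 0 = d.getD v 0 + ((l.flatMap (fun p => p.2)).count v : Int) := by
  induction l generalizing d with
  | nil => simp
  | cons p l ih =>
    simp only [List.foldl_cons, List.flatMap_cons, List.count_append]
    rw [ih, PySem.Dict.getD_foldl_insert_add_one]
    have hd1 : (if d.contains p.1 then d else d.insert p.1 0).getD v 0 = d.getD v 0 := by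
      by_cases h : d.contains p.1 = true
      · simp [h]
      · rw [if_neg h]
        by_cases hv : v = p.1
        · subst hv
          rw [PySem.Dict.getD_insert_self, PySem.Dict.getD_of_not_contains d 0 (by simpa using h)]
        · rw [PySem.Dict.getD_insert_of_ne d 0 0 hv]
    rw [hd1]
    push_cast
    ring

-- B side: the seen-set loop keeps order = seen (as lists) and both equal Set.update
theorem pv_seen_inner (xs : List String) (s : PySem.Set String) :
    xs.foldl
      (fun (st : List String × PySem.Set String) x =>
        if PySem.Set.contains st.2 x then st else (st.1 ++ [x], PySem.Set.add st.2 x))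
      (s, s) = (PySem.Set.update s xs, PySem.Set.update s xs) := by
  induction xs generalizing s with
  | nil => simp [PySem.Set.update]
  | cons x xs ih =>
    simp only [List.foldl_cons, PySem.Set.update_cons]
    by_cases h : PySem.Set.contains s x = true
    · rw [if_pos h, PySem.Set.add_of_mem (by simpa [PySem.Set.contains] using h)]
      exact ih s
    · rw [if_neg h]
      have : PySem.Set.add s x = s ++ [x] := by
        rw [PySem.Set.add_of_not_mem (by simpa [PySem.Set.contains] using h)]
      rw [← this]
      exact ih (PySem.Set.add s x)

theorem pv_seen_loop (l : List (String × List String)) (s : PySem.Set String) :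
    l.foldl
      (fun (st : List String × PySem.Set String) p =>
        (p.1 :: p.2).foldl
          (fun st x =>
            if PySem.Set.contains st.2 x then st else (st.1 ++ [x], PySem.Set.add st.2 x))
          st)
      (s, s) = (PySem.Set.update s (l.flatMap (fun p => p.1 :: p.2)),
                PySem.Set.update s (l.flatMap (fun p => p.1 :: p.2))) := by
  induction l generalizing s with
  | nil => simp [PySem.Set.update]
  | cons p l ih =>
    rw [List.foldl_cons, pv_seen_inner, List.flatMap_cons, PySem.Set.update_append]
    exact ih _

-- B side: the per-node counting scan equals the count in the flattened reference list
theorem pv_sum_count (l : List (String × List String)) (k : String) (s0 : Int) :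
    l.foldl (fun s p => s + (p.2.count k : Int)) s0
      = s0 + ((l.flatMap (fun p => p.2)).count k : Int) := by
  induction l generalizing s0 with
  | nil => simp
  | cons p l ih =>
    simp only [List.foldl_cons, List.flatMap_cons, List.count_append]
    rw [ih]
    push_cast
    ring

-- ===== VERDICT (by name: the statement is the Claim_ definition above) =====
theorem get_cnt_map_spec : Claim_equal_get_cnt_map := by
  intro l _
  unfold Spec_get_cnt_map get_cnt_map get_cnt_map_alt
  have hkeys := pv_keys_loop l PySem.Dict.empty
  rw [PySem.Dict.keys_empty] at hkeys
  have hnd : (PySem.Set.update ([] : PySem.Set String)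
      (l.flatMap (fun p => p.1 :: p.2))).Nodup := by
    have := PySem.Set.nodup_ofList (l.flatMap (fun p => p.1 :: p.2))
    simpa [PySem.Set.ofList, PySem.Set.empty] using this
  have hndA : (l.foldl
      (fun d p =>
        let d1 := if d.contains p.1 then d else d.insert p.1 0
        p.2.foldl (fun d req => d.insert req (d.getD req 0 + 1)) d1)
      (PySem.Dict.empty : PySem.Dict String Int)).keys.Nodup := by
    rw [hkeys]; exact hnd
  rw [PySem.Dict.items_eq_map_keys _ hndA 0, hkeys]
  have hseen : (PySem.Set.empty : PySem.Set String) = ([] : List String) := rfl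
  rw [show ((([] : List String), (PySem.Set.empty : PySem.Set String)))
      = (((PySem.Set.empty : PySem.Set String)), (PySem.Set.empty : PySem.Set String)) from rfl,
    pv_seen_loop]
  dsimp only
  have hemp : PySem.Set.update (PySem.Set.empty : PySem.Set String)
      (l.flatMap (fun p => p.1 :: p.2))
      = PySem.Set.update ([] : PySem.Set String) (l.flatMap (fun p => p.1 :: p.2)) := rfl
  rw [hemp]
  set ord := PySem.Set.update ([] : PySem.Set String) (l.flatMap (fun p => p.1 :: p.2)) with hord
  have hfresh := PySem.Dict.items_foldl_insert_fresh ord (fun k => k)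
    (fun k => l.foldl (fun s p => s + (p.2.count k : Int)) 0)
    (PySem.Dict.empty : PySem.Dict String Int)
    (fun a _ => PySem.Dict.contains_empty a) (by simpa using hnd)
  rw [hfresh, show (PySem.Dict.empty : PySem.Dict String Int).items = [] from rfl]
  simp only [List.nil_append]
  apply List.map_congr_left
  intro k _
  rw [pv_getD_loop, PySem.Dict.getD_empty, pv_sum_count]
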